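-- pv_equiv track=rewrite | github.com/lorenzolucchese/conditional-sig-wasserstein-gans | lib/augmentations.py | get_signature_control_indices
-- ===== SOURCE A (Python) =====
-- from typing import List, Tuple
--
-- def get_signature_control_indices(depth: int, martingale_indices: List[bool]) -> List[bool]:
--     channels = len(martingale_indices)
--     sig_indices = []
--     for i in range(1, depth + 1):
--         # in each signature level, of size channels**i, we want to set to True indices of signature levels ending in martigale indices
--         for j in martingale_indices:
--             if j:
--                 sig_indices.extend([True] * channels**(i-1))
--             else:
--                 sig_indices.extend([False] * channels**(i-1))
--     return sig_indices
-- ===== SOURCE B (Python) =====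
-- def get_signature_control_indices(depth, martingale_indices):
--     # Build a run-length encoding recursively: the RLE for depth d is one
--     # (flag, 1) run per channel followed by the RLE for depth d-1 with every
--     # run count multiplied by channels (which turns level k into level k+1).
--     # Then materialize the runs in a single flat pass.
--     def rle(d):
--         if d <= 0:
--             return []
--         return [(bool(j), 1) for j in martingale_indices] + \
--                [(v, n * len(martingale_indices)) for (v, n) in rle(d - 1)]
--     sig_indices = []
--     for v, n in rle(depth):
--         sig_indices += [v] * n
--     return sig_indices
-- ===== Notes on version B (the rewrite author's own statement) =====
-- stated objective: alternative
-- what changed: B works on a run-length-encoded intermediate built by recursion on depth (each deeper RLE is the flag runs followed by the previous RLE with all counts multiplied by channels) and materializes the runs in one flat pass, replacing A's nested level-by-flag loops with per-run exponentiation and an if/else branch.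
import Mathlib
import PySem

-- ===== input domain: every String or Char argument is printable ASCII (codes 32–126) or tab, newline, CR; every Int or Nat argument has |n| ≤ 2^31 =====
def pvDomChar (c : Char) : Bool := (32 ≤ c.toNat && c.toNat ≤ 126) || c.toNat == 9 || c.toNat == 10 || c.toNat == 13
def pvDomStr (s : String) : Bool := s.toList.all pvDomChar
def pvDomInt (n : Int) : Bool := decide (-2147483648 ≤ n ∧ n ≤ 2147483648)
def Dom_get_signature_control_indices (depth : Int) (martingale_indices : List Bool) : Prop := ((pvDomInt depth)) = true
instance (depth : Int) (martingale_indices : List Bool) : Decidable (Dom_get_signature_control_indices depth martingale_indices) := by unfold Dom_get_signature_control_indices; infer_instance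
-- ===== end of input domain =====

-- B is a different decomposition: it builds a run-length-encoded intermediate by recursion
-- on depth (deeper RLE = flag runs ++ previous RLE with all counts multiplied by channels)
-- and materializes the runs in one flat pass; no exponentiation, no per-level flag branch.

-- ===== PORT A =====
def get_signature_control_indices (depth : Int) (martingale_indices : List Bool) : List Bool :=
  let channels := martingale_indices.length
  (PySem.List.pyRange 1 (depth + 1) 1).foldl (fun sig_indices i =>
    martingale_indices.foldl (fun sig_indices j =>
      if j then sig_indices ++ List.replicate (channels ^ (i - 1).toNat) true
      else sig_indices ++ List.replicate (channels ^ (i - 1).toNat) false) sig_indices) []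

-- ===== PORT B =====
-- the recursive RLE builder ('bool(j)' is the identity on Bool)
def pvRle (d : Int) (martingale_indices : List Bool) : List (Bool × Nat) :=
  if d ≤ 0 then []
  else martingale_indices.map (fun j => (j, 1))
       ++ (pvRle (d - 1) martingale_indices).map
            (fun vn => (vn.1, vn.2 * martingale_indices.length))
termination_by d.toNat
decreasing_by omega

def get_signature_control_indices_alt (depth : Int) (martingale_indices : List Bool) : List Bool :=
  (pvRle depth martingale_indices).foldl
    (fun sig_indices vn => sig_indices ++ List.replicate vn.2 vn.1) []

-- ===== PRECONDITION & SPEC =====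
def Spec_get_signature_control_indices (depth : Int) (martingale_indices : List Bool) (out : List Bool) : Prop := out = get_signature_control_indices_alt depth martingale_indices
instance (depth : Int) (martingale_indices : List Bool) (out : List Bool) : Decidable (Spec_get_signature_control_indices depth martingale_indices out) := by unfold Spec_get_signature_control_indices; infer_instance

-- ===== CLAIM =====
def Claim_equal_get_signature_control_indices : Prop := ∀ (depth : Int) (martingale_indices : List Bool), Dom_get_signature_control_indices depth martingale_indices → Spec_get_signature_control_indices depth martingale_indices (get_signature_control_indices depth martingale_indices)

-- ===== LEMMAS AND PROOFS =====

-- common specification: concatenation of the depth signature levels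
def pvLevels (c : Nat) (n : Nat) (mi : List Bool) : List Bool :=
  (List.range n).flatMap (fun k => mi.flatMap (fun j => List.replicate (c ^ k) j))

theorem pv_innerA (mi : List Bool) (k : Nat) (s : List Bool) :
    mi.foldl (fun sig j =>
      if j then sig ++ List.replicate k true else sig ++ List.replicate k false) s
      = s ++ mi.flatMap (fun j => List.replicate k j) := by
  induction mi generalizing s with
  | nil => simp
  | cons j t ih => cases j <;> simp [List.foldl_cons, ih]

theorem pv_A_eq (mi : List Bool) (n : Nat) :
    (PySem.List.pyRange 1 ((n : Int) + 1) 1).foldl (fun sig i =>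
      mi.foldl (fun sig j =>
        if j then sig ++ List.replicate (mi.length ^ (i - 1).toNat) true
        else sig ++ List.replicate (mi.length ^ (i - 1).toNat) false) sig) []
      = pvLevels mi.length n mi := by
  induction n with
  | zero => simp [PySem.List.pyRange_one_eq_nil, pvLevels]
  | succ n ih =>
      have h : PySem.List.pyRange 1 ((↑(n + 1) : Int) + 1) 1
          = PySem.List.pyRange 1 ((n : Int) + 1) 1 ++ [(n : Int) + 1] := by
        have := PySem.List.pyRange_one_succ_right (a := 1) (b := (n : Int) + 1) (by omega)
        simpa [Nat.cast_add, Nat.cast_one, add_assoc] using this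
      rw [h, List.foldl_append, ih]
      simp only [List.foldl_cons, List.foldl_nil]
      rw [pv_innerA]
      simp [pvLevels, List.range_succ]

-- the RLE spec: one (flag, c^k) run per channel per level
def pvRleSpec (c : Nat) (n : Nat) (mi : List Bool) : List (Bool × Nat) :=
  (List.range n).flatMap (fun k => mi.map (fun j => (j, c ^ k)))

theorem pv_rle_eq (mi : List Bool) (n : Nat) :
    pvRle (n : Int) mi = pvRleSpec mi.length n mi := by
  induction n with
  | zero => rw [pvRle]; simp [pvRleSpec]
  | succ n ih =>
      rw [pvRle]
      have h0 : ¬ ((↑(n + 1) : Int) ≤ 0) := by omega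
      have h1 : (↑(n + 1) : Int) - 1 = (n : Int) := by omega
      simp only [h0, if_false, h1, ih]
      simp [pvRleSpec, List.range_succ_eq_map, List.flatMap_cons, List.flatMap_map,
            List.map_flatMap, Function.comp_def, pow_succ]

-- materialization: the foldl over runs is the flatMap of replicates
theorem pv_materialize (runs : List (Bool × Nat)) (s : List Bool) :
    runs.foldl (fun sig vn => sig ++ List.replicate vn.2 vn.1) s
      = s ++ runs.flatMap (fun vn => List.replicate vn.2 vn.1) := by
  induction runs generalizing s with
  | nil => simp
  | cons r t ih => simp [List.foldl_cons, ih]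

theorem pv_B_eq (mi : List Bool) (n : Nat) :
    get_signature_control_indices_alt (n : Int) mi = pvLevels mi.length n mi := by
  unfold get_signature_control_indices_alt
  rw [pv_rle_eq, pv_materialize]
  simp [pvRleSpec, pvLevels, List.flatMap_assoc, List.flatMap_map]

-- ===== VERDICT =====
theorem get_signature_control_indices_spec : Claim_equal_get_signature_control_indices := by
  intro depth mi _
  unfold Spec_get_signature_control_indices
  by_cases hd : depth ≤ 0
  · have hA : PySem.List.pyRange 1 (depth + 1) 1 = [] :=
      PySem.List.pyRange_one_eq_nil (by omega)
    rw [get_signature_control_indices_alt, pvRle]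
    simp [get_signature_control_indices, hA, hd]
  · have hn : depth = ((depth.toNat : Nat) : Int) := by omega
    rw [hn, pv_B_eq mi depth.toNat]
    simp only [get_signature_control_indices]
    rw [pv_A_eq mi depth.toNat]
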